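-- pv_equiv track=rewrite | github.com/AKKIREDDYGANESH/HackerRank_Solutions | PhonenumberChange.py | full_string
-- ===== SOURCE A (Python) =====
-- def word_change(a):
--     word_to_digit = {
--         'one': '1',
--         'two': '2',
--         'three': '3',
--         'four': '4',
--         'five': '5',
--         'six': '6',
--         'seven': '7',
--         'eight': '8',
--         'nine': '9',
--         'zero':'0',
--     }
--
--     return word_to_digit[a]
--
-- def full_string(input1):
--     words = input1.split()
--     result = ""
--     i = 0
--     while i< len(words):
--         word = words[i]
--         if word == "double":
--             next_number = words[i+1]
--             number = word_change(next_number)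
--             #result.append(number*2)
--             result += number*2
--             i +=2
--         elif word == "triple":
--             next_number = words[i+1]
--             number = word_change(next_number)
--             #result.append(number*3)
--             result += number*3
--             i +=2
--
--         else:
--             #result.append(word_change(word))
--             result += word_change(word)
--             i +=1
--
--     return result
-- ===== SOURCE B (Python) =====
-- def full_string(input1):
--     word_to_digit = {
--         'one': '1', 'two': '2', 'three': '3', 'four': '4', 'five': '5',
--         'six': '6', 'seven': '7', 'eight': '8', 'nine': '9', 'zero': '0',
--     }
--     result = ""
--     rep = 1
--     for w in input1.split():
--         if w == "double":
--             rep = 2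
--         elif w == "triple":
--             rep = 3
--         else:
--             result += word_to_digit[w] * rep
--             rep = 1
--     return result
-- ===== Notes on version B (the rewrite author's own statement) =====
-- stated objective: simpler
-- what changed: Replaces A's while-loop with index lookahead (words[i+1], i += 2) by a single for-loop carrying a pending repeat-count state (1/2/3) and no indexing at all.
-- outside the precondition, e.g. on full_string('double'): A raises IndexError, B returns ''; on full_string('triple'): A raises IndexError, B returns ''
import Mathlib
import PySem

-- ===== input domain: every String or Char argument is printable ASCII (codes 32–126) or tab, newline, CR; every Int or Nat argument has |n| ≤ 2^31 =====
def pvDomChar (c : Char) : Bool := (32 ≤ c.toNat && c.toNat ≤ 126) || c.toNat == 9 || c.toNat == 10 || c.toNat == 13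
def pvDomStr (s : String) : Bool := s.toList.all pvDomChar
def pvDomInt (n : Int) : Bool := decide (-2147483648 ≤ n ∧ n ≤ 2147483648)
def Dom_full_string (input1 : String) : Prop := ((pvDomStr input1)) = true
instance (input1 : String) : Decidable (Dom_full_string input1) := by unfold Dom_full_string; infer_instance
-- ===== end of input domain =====

-- B replaces A's index-lookahead while loop by a single pass with a pending repeat-count state (simpler; same cost).

-- ===== PORT A =====
-- the word_to_digit dict (same literal in A and in B); indexing it raises KeyError where get? = none (excluded by Pre_).
def pvWordToDigit : PySem.Dict String String :=
  PySem.Dict.ofList [("one","1"),("two","2"),("three","3"),("four","4"),("five","5"),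
                     ("six","6"),("seven","7"),("eight","8"),("nine","9"),("zero","0")]

def pvWordChangeA? (a : String) : Option String := pvWordToDigit.get? a

-- A's while loop over the word list; i += 2 = drop two words. The [] cases under
-- "double"/"triple" are Python's IndexError (words[i+1]), excluded by Pre_.
def pvLoopA : List String → List Char
  | [] => []
  | w :: rest =>
    if w == "double" then
      match rest with
      | [] => []
      | n :: rest2 =>
        let number := ((pvWordChangeA? n).getD "").toList
        number ++ number ++ pvLoopA rest2
    else if w == "triple" then
      match rest with
      | [] => []
      | n :: rest2 =>
        let number := ((pvWordChangeA? n).getD "").toList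
        number ++ number ++ number ++ pvLoopA rest2
    else ((pvWordChangeA? w).getD "").toList ++ pvLoopA rest

def full_string (input1 : String) : String := String.ofList (pvLoopA (PySem.Str.split₀ input1))

-- ===== PORT B =====
-- one step of B's for loop; state = (result so far, pending repeat count)
def pvStepB (st : List Char × Int) (w : String) : List Char × Int :=
  if w == "double" then (st.1, 2)
  else if w == "triple" then (st.1, 3)
  else (st.1 ++ PySem.List.pyRepeat ((pvWordToDigit.get? w).getD "").toList st.2, 1)

def full_string_alt (input1 : String) : String :=
  String.ofList (((PySem.Str.split₀ input1).foldl pvStepB ([], 1)).1)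

-- ===== PRECONDITION & SPEC =====
def pvIsDigitWord (w : String) : Bool :=
  ["one","two","three","four","five","six","seven","eight","nine","zero"].contains w

-- grammar automaton for the spoken-number language: state 'some true' = a multiplier was just
-- read (next word must be a digit word), 'some false' = neutral, 'none' = rejected
def pvStepV (st : Option Bool) (w : String) : Option Bool :=
  match st with
  | none => none
  | some true => if pvIsDigitWord w then some false else none
  | some false =>
    if w == "double" || w == "triple" then some true
    else if pvIsDigitWord w then some false else none

-- the word lists A parses without raising: every multiplier followed by a digit word, every
-- other word a digit word
def pvValid (ws : List String) : Bool := ws.foldl pvStepV (some false) == some false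

-- Pre_ excludes exactly the inputs where A raises (KeyError on a word outside the dict,
-- IndexError on a trailing 'double'/'triple'); A returns on every input satisfying Pre_.
def Pre_full_string (input1 : String) : Prop := pvValid (PySem.Str.split₀ input1) = true
instance (input1 : String) : Decidable (Pre_full_string input1) := by unfold Pre_full_string; infer_instance

def pvWitness_full_string : String := "double one triple two zero"

def Spec_full_string (input1 : String) (out : String) : Prop := out = full_string_alt input1
instance (input1 : String) (out : String) : Decidable (Spec_full_string input1 out) := by unfold Spec_full_string; infer_instance

-- ===== CLAIM (what is proved, stated in full; the proofs are below) =====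
def Claim_equal_full_string : Prop := ∀ (input1 : String), Dom_full_string input1 → Pre_full_string input1 → Spec_full_string input1 (full_string input1)

-- ===== LEMMAS AND PROOFS =====

lemma pvDigit_not_mult (w : String) (h : pvIsDigitWord w = true) :
    (w == "double") = false ∧ (w == "triple") = false := by
  simp [pvIsDigitWord] at h
  rcases h with rfl|rfl|rfl|rfl|rfl|rfl|rfl|rfl|rfl|rfl <;> exact ⟨rfl, rfl⟩

-- the rejected automaton state is absorbing
lemma pvDead : ∀ (l : List String), l.foldl pvStepV none = none := by
  intro l; induction l with
  | nil => rfl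
  | cons w t ih => simpa [List.foldl, pvStepV] using ih

-- B's fold started with pending count 1 on a valid word list produces A's output with pending 1.
lemma pvMain : ∀ (k : Nat) (ws : List String), ws.length ≤ k → pvValid ws = true →
    ∀ out : List Char, ws.foldl pvStepB (out, 1) = (out ++ pvLoopA ws, 1) := by
  intro k
  induction k with
  | zero =>
    intro ws hlen _ out
    have : ws = [] := List.eq_nil_of_length_eq_zero (Nat.le_zero.mp hlen)
    subst this; simp [pvLoopA]
  | succ k ih =>
    intro ws hlen hv out
    match ws with
    | [] => simp [pvLoopA]
    | w :: rest =>
      unfold pvValid at hv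
      rw [List.foldl_cons] at hv
      by_cases hmult : (w == "double" || w == "triple") = true
      · rw [show pvStepV (some false) w = some true by simp [pvStepV, hmult]] at hv
        match rest with
        | [] => simp at hv
        | n :: rest2 =>
          rw [List.foldl_cons] at hv
          by_cases hn : pvIsDigitWord n = true
          · rw [show pvStepV (some true) n = some false by simp [pvStepV, hn]] at hv
            have hlen2 : rest2.length ≤ k := by simp at hlen; omega
            have hih := ih rest2 hlen2 hv
            simp only [Bool.or_eq_true, beq_iff_eq] at hmult
            rcases hmult with rfl | rfl
            · rw [List.foldl_cons, List.foldl_cons,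
                  show pvStepB (out, 1) "double" = (out, 2) from rfl,
                  show pvStepB (out, 2) n
                      = (out ++ PySem.List.pyRepeat ((pvWordToDigit.get? n).getD "").toList 2, 1) by
                    simp [pvStepB, (pvDigit_not_mult n hn).1, (pvDigit_not_mult n hn).2],
                  hih]
              simp [pvLoopA, pvWordChangeA?, PySem.List.pyRepeat, List.append_assoc]
            · rw [List.foldl_cons, List.foldl_cons,
                  show pvStepB (out, 1) "triple" = (out, 3) from rfl,
                  show pvStepB (out, 3) n
                      = (out ++ PySem.List.pyRepeat ((pvWordToDigit.get? n).getD "").toList 3, 1) by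
                    simp [pvStepB, (pvDigit_not_mult n hn).1, (pvDigit_not_mult n hn).2],
                  hih]
              simp [pvLoopA, pvWordChangeA?, PySem.List.pyRepeat, List.append_assoc]
          · rw [show pvStepV (some true) n = none by simp [pvStepV, hn]] at hv
            rw [pvDead] at hv; simp at hv
      · have hm' : (w == "double" || w == "triple") = false := by
          simpa using hmult
        by_cases hw : pvIsDigitWord w = true
        · rw [show pvStepV (some false) w = some false by simp [pvStepV, hm', hw]] at hv
          have hlen2 : rest.length ≤ k := by simp at hlen; omega
          have hih := ih rest hlen2 hv
          rw [List.foldl_cons,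
              show pvStepB (out, 1) w
                  = (out ++ PySem.List.pyRepeat ((pvWordToDigit.get? w).getD "").toList 1, 1) by
                simp [pvStepB, (pvDigit_not_mult w hw).1, (pvDigit_not_mult w hw).2],
              hih,
              show pvLoopA (w :: rest) = ((pvWordChangeA? w).getD "").toList ++ pvLoopA rest by
                rw [pvLoopA.eq_def]
                simp [(pvDigit_not_mult w hw).1, (pvDigit_not_mult w hw).2]]
          simp [pvWordChangeA?, PySem.List.pyRepeat, List.append_assoc]
        · rw [show pvStepV (some false) w = none by simp [pvStepV, hm', hw]] at hv
          rw [pvDead] at hv; simp at hv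

-- ===== VERDICT (by name: the statement is the Claim_ definition above) =====
theorem full_string_spec : Claim_equal_full_string := by
  intro input1 _ hpre
  unfold Spec_full_string full_string full_string_alt
  rw [pvMain (PySem.Str.split₀ input1).length _ le_rfl hpre []]
  simp
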